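-- pv_equiv track=rewrite | github.com/marcmiras/AOC_2023 | AOC7/main.py | calculate_final_score
-- ===== SOURCE A (Python) =====
-- def calculate_final_score(sorted_hands):
--     total_score = 0
--     index = 1
--
--     for hands_list in reversed(sorted_hands):
--         for card, bid in hands_list:
--             total_score += index * bid
--             index += 1
--
--     return total_score
-- ===== SOURCE B (Python) =====
-- def calculate_final_score(sorted_hands):
--     bids = [bid for hand in sorted_hands for _, bid in reversed(hand)]
--     n = len(bids)
--     return sum((n - i) * b for i, b in enumerate(bids))
-- ===== Notes on version B (the rewrite author's own statement) =====
-- stated objective: alternative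
-- what changed: Replaces the stateful nested-loop rank counter with a staged computation: flatten the bids in the opposite orientation, then sum closed-form weights (n - i) over a single enumerated pass.
import Mathlib
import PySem

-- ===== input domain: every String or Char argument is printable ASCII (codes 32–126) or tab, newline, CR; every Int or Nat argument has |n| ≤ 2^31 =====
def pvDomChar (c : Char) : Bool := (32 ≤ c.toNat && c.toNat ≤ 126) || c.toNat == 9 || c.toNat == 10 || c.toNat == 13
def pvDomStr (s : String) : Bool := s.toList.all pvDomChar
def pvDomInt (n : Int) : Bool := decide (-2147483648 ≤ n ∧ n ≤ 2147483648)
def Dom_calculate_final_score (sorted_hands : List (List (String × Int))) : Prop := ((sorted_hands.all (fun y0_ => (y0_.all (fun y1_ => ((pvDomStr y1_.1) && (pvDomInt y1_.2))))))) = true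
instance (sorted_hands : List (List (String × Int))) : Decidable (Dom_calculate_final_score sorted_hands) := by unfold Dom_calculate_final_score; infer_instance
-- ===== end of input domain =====

-- B replaces A's stateful nested-loop rank counter with a staged computation: flatten the
-- bids in the opposite orientation, then sum closed-form weights (n - i) in one enumerated pass.

-- ===== PORT A =====
-- state = (total_score, index); outer loop over reversed(sorted_hands), inner over hands_list
def calculate_final_score (sorted_hands : List (List (String × Int))) : Int :=
  (sorted_hands.reverse.foldl
    (fun (st : Int × Int) hl =>
      hl.foldl (fun (st : Int × Int) cb => (st.1 + st.2 * cb.2, st.2 + 1)) st)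
    (0, 1)).1

-- ===== PORT B =====
-- bids = flattening comprehension (inner lists reversed); then Σ (n - i) * b over enumerate(bids)
def calculate_final_score_alt (sorted_hands : List (List (String × Int))) : Int :=
  let bids := sorted_hands.flatMap (fun hand => hand.reverse.map Prod.snd)
  let n : Int := bids.length
  ((PySem.List.enumerate bids).map (fun ib => (n - ib.1) * ib.2)).sum

-- ===== PRECONDITION & SPEC =====
def Spec_calculate_final_score (sorted_hands : List (List (String × Int))) (out : Int) : Prop := out = calculate_final_score_alt sorted_hands
instance (sorted_hands : List (List (String × Int))) (out : Int) : Decidable (Spec_calculate_final_score sorted_hands out) := by unfold Spec_calculate_final_score; infer_instance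

-- ===== CLAIM (what is proved, stated in full; the proofs are below) =====
def Claim_equal_calculate_final_score : Prop := ∀ (sorted_hands : List (List (String × Int))), Dom_calculate_final_score sorted_hands → Spec_calculate_final_score sorted_hands (calculate_final_score sorted_hands)

-- ===== LEMMAS AND PROOFS =====

-- A's flat step function on bare bids
def stepA (st : Int × Int) (b : Int) : Int × Int := (st.1 + st.2 * b, st.2 + 1)

-- W l = Σ (k+1) * l_k  (A's weighted sum);  V l = Σ (|tail|+1) * head = Σ (n-i) * l_i
def W : List Int → Int
  | [] => 0
  | b :: l => b + l.sum + W l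

def V : List Int → Int
  | [] => 0
  | b :: l => (l.length + 1) * b + V l

lemma innerA (hl : List (String × Int)) (st : Int × Int) :
    hl.foldl (fun (st : Int × Int) cb => (st.1 + st.2 * cb.2, st.2 + 1)) st
      = (hl.map Prod.snd).foldl stepA st := by
  induction hl generalizing st with
  | nil => rfl
  | cons p t ih => simp [List.foldl, stepA, ih]

lemma outerA (L : List (List (String × Int))) (st : Int × Int) :
    L.foldl (fun (st : Int × Int) hl =>
        hl.foldl (fun (st : Int × Int) cb => (st.1 + st.2 * cb.2, st.2 + 1)) st) st
      = (L.flatMap (fun hl => hl.map Prod.snd)).foldl stepA st := by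
  induction L generalizing st with
  | nil => rfl
  | cons hl t ih => rw [List.flatMap_cons, List.foldl_append, List.foldl_cons, innerA, ih]

lemma foldA_closed (l : List Int) (t i : Int) :
    l.foldl stepA (t, i) = (t + (i - 1) * l.sum + W l, i + l.length) := by
  induction l generalizing t i with
  | nil => simp [W]
  | cons b r ih =>
    simp only [List.foldl, stepA, ih, W, List.sum_cons, List.length_cons, Prod.mk.injEq]
    constructor <;> (push_cast; ring)

lemma W_append_singleton (l : List Int) (b : Int) :
    W (l ++ [b]) = W l + (l.length + 1) * b := by
  induction l with
  | nil => simp [W]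
  | cons c t ih => simp only [List.cons_append, W, ih, List.sum_append, List.length_cons,
      List.sum_cons, List.sum_nil]; push_cast; ring

lemma V_eq_W_reverse (l : List Int) : V l = W l.reverse := by
  induction l with
  | nil => rfl
  | cons b t ih => simp [V, W_append_singleton, ih]; ring

-- B's enumerated weighted sum equals V, for any start index j with n = j + |m|
lemma enum_sum_eq_V (m : List Int) (j n : Int) (h : n = j + m.length) :
    ((PySem.List.enumerate m j).map (fun ib => (n - ib.1) * ib.2)).sum = V m := by
  induction m generalizing j with
  | nil => simp [PySem.List.enumerate_nil, V]
  | cons b t ih =>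
    rw [PySem.List.enumerate_cons, List.map_cons, List.sum_cons, ih (j + 1) (by
      simp only [List.length_cons] at h; push_cast at h ⊢; omega)]
    simp only [V, List.length_cons] at h ⊢
    push_cast at h ⊢
    rw [h]; ring

-- the two flat bid lists are reverses of each other
lemma bids_reverse (sh : List (List (String × Int))) :
    (sh.flatMap (fun hl => hl.reverse.map Prod.snd)).reverse
      = sh.reverse.flatMap (fun hl => hl.map Prod.snd) := by
  simp [List.reverse_flatMap, Function.comp_def]

-- ===== VERDICT (by name: the statement is the Claim_ definition above) =====
theorem calculate_final_score_spec : Claim_equal_calculate_final_score := by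
  intro sh _
  unfold Spec_calculate_final_score calculate_final_score calculate_final_score_alt
  rw [outerA, foldA_closed,
    enum_sum_eq_V _ 0 _ (by simp), V_eq_W_reverse, bids_reverse]
  simp
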